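-- pv_equiv track=rewrite | github.com/fleetour/ai-projectChat | app_v1 works.py | select_top_chunk
-- ===== SOURCE A (Python) =====
-- def select_top_chunk(query, chunks):
--     """
--     Return the chunk that contains the most words from the query.
--     """
--     query_words = set(query.lower().split())
--     best_chunk = None
--     max_matches = 0
--
--     for chunk in chunks:
--         chunk_words = set(chunk.lower().split())
--         matches = len(query_words & chunk_words)
--         if matches > max_matches:
--             max_matches = matches
--             best_chunk = chunk
--
--     return best_chunk if best_chunk else chunks[0]
-- ===== SOURCE B (Python) =====
-- def select_top_chunk(query, chunks):
--     """
--     Return the chunk that contains the most words from the query.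
--
--     Inverted-index strategy: one pass builds word -> chunk-index lists,
--     then only the query's words are consulted to accumulate per-chunk
--     match counts; the first chunk with the maximal count wins.
--     """
--     index = {}
--     for i, chunk in enumerate(chunks):
--         for w in set(chunk.lower().split()):
--             index.setdefault(w, []).append(i)
--
--     counts = {}
--     for w in set(query.lower().split()):
--         for i in index.get(w, []):
--             counts[i] = counts.get(i, 0) + 1
--
--     best_i = max(range(len(chunks)), key=lambda i: counts.get(i, 0))
--     return chunks[best_i]
-- ===== Notes on version B (the rewrite author's own statement) =====
-- stated objective: alternative
-- what changed: Replaces the per-chunk set-intersection scan with an inverted index (word -> chunk indices) built in one pass, then accumulates match counts only for the query's words and picks the first argmax index over range(len(chunks)).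
import Mathlib
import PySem

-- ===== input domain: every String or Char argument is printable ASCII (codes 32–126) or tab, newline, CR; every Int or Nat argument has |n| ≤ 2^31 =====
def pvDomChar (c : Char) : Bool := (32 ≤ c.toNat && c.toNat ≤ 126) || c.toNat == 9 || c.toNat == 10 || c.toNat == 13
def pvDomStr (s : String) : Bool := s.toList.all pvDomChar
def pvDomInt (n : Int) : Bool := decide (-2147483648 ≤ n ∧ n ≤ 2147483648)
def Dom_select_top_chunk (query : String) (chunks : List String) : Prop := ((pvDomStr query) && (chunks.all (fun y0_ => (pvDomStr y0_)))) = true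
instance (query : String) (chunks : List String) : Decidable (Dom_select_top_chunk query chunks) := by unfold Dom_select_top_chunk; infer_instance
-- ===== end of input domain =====

-- B replaces A's per-chunk set-intersection scan with an inverted index (word -> chunk indices)
-- plus a match-count dict and a first-argmax over the index range (objective: alternative).


-- ===== PORT A =====
def select_top_chunk (query : String) (chunks : List String) : String :=
  let query_words : PySem.Set String :=
    PySem.Set.ofList (PySem.Str.split₀ (PySem.Str.lower query))
  let st := chunks.foldl (fun st chunk =>
      let chunk_words : PySem.Set String :=
        PySem.Set.ofList (PySem.Str.split₀ (PySem.Str.lower chunk))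
      let mtc := PySem.Set.len (PySem.Set.inter query_words chunk_words)
      if mtc > st.2 then (some chunk, mtc) else st)
    ((none : Option String), (0 : Int))
  -- `best_chunk if best_chunk else chunks[0]`; chunks[0] raises IndexError on [] (excluded by Pre_)
  match st.1 with
  | some bc => if bc = "" then PySem.List.pyGetD chunks 0 "" else bc
  | none => PySem.List.pyGetD chunks 0 ""

-- ===== PORT B =====
def select_top_chunk_alt (query : String) (chunks : List String) : String :=
  let index : PySem.Dict String (List Int) :=
    (PySem.List.enumerate chunks).foldl (fun d p =>
      (PySem.Set.ofList (PySem.Str.split₀ (PySem.Str.lower p.2))).foldl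
        (fun d w => d.modify w [] (· ++ [p.1])) d) PySem.Dict.empty
  let counts : PySem.Dict Int Int :=
    (PySem.Set.ofList (PySem.Str.split₀ (PySem.Str.lower query))).foldl (fun d w =>
      (index.getD w []).foldl (fun d i => d.modify i 0 (· + 1)) d) PySem.Dict.empty
  -- max(range(len(chunks)), key=…): first maximal index; raises ValueError on [] (excluded by Pre_)
  let best := PySem.List.max? (PySem.List.pyRange 0 (PySem.List.len chunks) 1)
      (fun i => counts.getD i 0)
  PySem.List.pyGetD chunks (best.getD 0) ""

-- ===== PRECONDITION & SPEC =====
-- A raises IndexError on chunks = [] (and B raises ValueError there); nothing else is excluded.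
def Pre_select_top_chunk (query : String) (chunks : List String) : Prop := chunks ≠ []
instance (query : String) (chunks : List String) : Decidable (Pre_select_top_chunk query chunks) := by unfold Pre_select_top_chunk; infer_instance
def pvWitness_select_top_chunk : String × List String := ("hello world", ["foo bar", "say hello"])
def Spec_select_top_chunk (query : String) (chunks : List String) (out : String) : Prop := out = select_top_chunk_alt query chunks
instance (query : String) (chunks : List String) (out : String) : Decidable (Spec_select_top_chunk query chunks out) := by unfold Spec_select_top_chunk; infer_instance

-- ===== CLAIM (what is proved, stated in full; the proofs are below) =====
def Claim_equal_select_top_chunk : Prop := ∀ (query : String) (chunks : List String), Dom_select_top_chunk query chunks → Pre_select_top_chunk query chunks → Spec_select_top_chunk query chunks (select_top_chunk query chunks)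

-- ===== LEMMAS AND PROOFS =====

-- the lowercased word set of a string
def pvWords (x : String) : PySem.Set String :=
  PySem.Set.ofList (PySem.Str.split₀ (PySem.Str.lower x))

-- one chunk's contribution to the inverted index: its own index appended to the
-- posting list of each of its (distinct) words
theorem pv_inner (ws : List String) (hn : ws.Nodup) (d : PySem.Dict String (List Int))
    (w : String) (i : Int) :
    (ws.foldl (fun d w' => d.modify w' [] (· ++ [i])) d).getD w []
      = d.getD w [] ++ (if w ∈ ws then [i] else []) := by
  have h1 : (ws.foldl (fun d w' => d.modify w' [] (· ++ [i])) d)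
      = ((ws.map (fun w' => (w', i))).foldl (fun d p => d.modify p.1 [] (· ++ [p.2])) d) := by
    rw [List.foldl_map]
  rw [h1, PySem.Dict.getD_foldl_modify_append]
  congr 1
  rw [List.filter_map]
  have h2 : ((fun p : String × Int => p.1 == w) ∘ fun w' => (w', i)) = (fun w' => w' == w) := rfl
  rw [h2, List.filter_beq, List.map_map]
  by_cases hm : w ∈ ws
  · rw [List.count_eq_one_of_mem hn hm]; simp [hm]
  · rw [List.count_eq_zero_of_not_mem hm]; simp [hm]

-- inverted-index characterisation: the posting list of w is the list of enumerated
-- indices whose word set contains w, in order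
theorem pv_index_getD (L : List (Int × String)) (d : PySem.Dict String (List Int)) (w : String) :
    (L.foldl (fun d p =>
        (PySem.Set.ofList (PySem.Str.split₀ (PySem.Str.lower p.2))).foldl
          (fun d w => d.modify w [] (· ++ [p.1])) d) d).getD w []
      = d.getD w [] ++ (L.filter (fun p => PySem.Set.contains (pvWords p.2) w)).map (·.1) := by
  induction L generalizing d with
  | nil => simp
  | cons p L ih =>
    rw [List.foldl_cons, ih, pv_inner _ (PySem.Set.nodup_ofList _), List.filter_cons]
    by_cases hm : w ∈ pvWords p.2
    · have hc : PySem.Set.contains (pvWords p.2) w = true := by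
        rw [PySem.Set.contains_iff]; exact hm
      have hm' : w ∈ PySem.Str.split₀ (PySem.Str.lower p.2) :=
        (PySem.Set.mem_ofList _ _).mp (by simpa [pvWords] using hm)
      simp [hm, hm']
    · have hc : PySem.Set.contains (pvWords p.2) w = false := by
        rw [Bool.eq_false_iff]; intro h; exact hm ((PySem.Set.contains_iff _ _).mp h)
      have hm' : w ∉ PySem.Str.split₀ (PySem.Str.lower p.2) := fun h =>
        hm (by simpa [pvWords] using (PySem.Set.mem_ofList _ _).mpr h)
      simp [hm, hm']

-- counts characterisation: counts[i] defaults to the total multiplicity of i over the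
-- consulted posting lists
theorem pv_counts_getD (idx : String → List Int) (ws : List String)
    (d : PySem.Dict Int Int) (i : Int) :
    (ws.foldl (fun d w => (idx w).foldl (fun d i => d.modify i 0 (· + 1)) d) d).getD i 0
      = d.getD i 0 + (ws.map (fun w => ((idx w).count i : Int))).sum := by
  induction ws generalizing d with
  | nil => simp
  | cons w ws ih =>
    simp only [List.foldl_cons, List.map_cons, List.sum_cons, ih,
      PySem.Dict.getD_foldl_modify_add_one]
    ring

-- a posting list holds index i at most once: its count of i is a membership test
theorem pv_postings_count (chunks : List String) (w : String) (i : Int)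
    (h0 : 0 ≤ i) (hn : i.toNat < chunks.length) :
    ((((PySem.List.enumerate chunks).filter
        (fun p => (pvWords p.2).contains w)).map (·.1)).count i)
      = if (pvWords (chunks[i.toNat])).contains w then 1 else 0 := by
  have hnodup : (((PySem.List.enumerate chunks).filter
      (fun p => (pvWords p.2).contains w)).map (·.1)).Nodup := by
    have h1 := PySem.List.pairwise_lt_enumerate chunks 0
    have h2 := h1.filter (fun p => (pvWords p.2).contains w)
    exact (List.pairwise_map.mpr h2).imp ne_of_lt
  have hmem : i ∈ (((PySem.List.enumerate chunks).filter
      (fun p => (pvWords p.2).contains w)).map (·.1))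
      ↔ (pvWords (chunks[i.toNat])).contains w = true := by
    constructor
    · rintro hm
      obtain ⟨p, hp, hpi⟩ := List.mem_map.mp hm
      obtain ⟨hpe, hq⟩ := List.mem_filter.mp hp
      obtain ⟨k, hk, rfl⟩ := (PySem.List.mem_enumerate_iff _ _ _).mp hpe
      simp only at hpi hq
      have hki : k = i.toNat := by omega
      subst hki
      simpa using hq
    · intro hq
      refine List.mem_map.mpr
        ⟨(i, chunks[i.toNat]), List.mem_filter.mpr ⟨?_, by simpa using hq⟩, rfl⟩
      exact (PySem.List.mem_enumerate_iff _ _ _).mpr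
        ⟨i.toNat, hn, by simp [Int.toNat_of_nonneg h0]⟩
  by_cases hq : (pvWords (chunks[i.toNat])).contains w = true
  · rw [if_pos hq, List.count_eq_one_of_mem hnodup (hmem.mpr hq)]
  · rw [if_neg hq, List.count_eq_zero_of_not_mem]
    intro hm; exact hq (hmem.mp hm)

-- B's counts dict agrees with A's per-chunk intersection score on every valid index
theorem pv_counts_eq_score (query : String) (chunks : List String) (i : Int)
    (h0 : 0 ≤ i) (hlt : i < (chunks.length : Int)) :
    ((PySem.Set.ofList (PySem.Str.split₀ (PySem.Str.lower query))).foldl (fun d w =>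
        (((PySem.List.enumerate chunks).foldl (fun d p =>
            (PySem.Set.ofList (PySem.Str.split₀ (PySem.Str.lower p.2))).foldl
              (fun d w => d.modify w [] (· ++ [p.1])) d) PySem.Dict.empty).getD w []).foldl
          (fun d i => d.modify i 0 (· + 1)) d) PySem.Dict.empty).getD i 0
    = PySem.Set.len (PySem.Set.inter (pvWords query)
        (pvWords (PySem.List.pyGetD chunks i ""))) := by
  have hn : i.toNat < chunks.length := by omega
  rw [pv_counts_getD (fun w =>
      (((PySem.List.enumerate chunks).foldl (fun d p =>
          (PySem.Set.ofList (PySem.Str.split₀ (PySem.Str.lower p.2))).foldl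
            (fun d w => d.modify w [] (· ++ [p.1])) d) PySem.Dict.empty).getD w []))]
  have hmap : ((PySem.Set.ofList (PySem.Str.split₀ (PySem.Str.lower query))).map (fun w =>
      ((((PySem.List.enumerate chunks).foldl (fun d p =>
          (PySem.Set.ofList (PySem.Str.split₀ (PySem.Str.lower p.2))).foldl
            (fun d w => d.modify w [] (· ++ [p.1])) d) PySem.Dict.empty).getD w []).count i
        : Int)))
      = ((PySem.Set.ofList (PySem.Str.split₀ (PySem.Str.lower query))).map (fun w =>
          if (pvWords (chunks[i.toNat])).contains w then (1 : Int) else 0)) := by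
    refine List.map_congr_left (fun w _ => ?_)
    rw [pv_index_getD]
    have he : (PySem.Dict.empty : PySem.Dict String (List Int)).getD w [] = [] := rfl
    rw [he, List.nil_append, pv_postings_count chunks w i h0 hn]
    split_ifs <;> simp
  rw [hmap, PySem.List.sum_map_ite_one_zero]
  have he2 : (PySem.Dict.empty : PySem.Dict Int Int).getD i 0 = 0 := rfl
  rw [he2, zero_add]
  rw [PySem.List.pyGetD_eq_getElem chunks "" h0 hlt]
  simp only [PySem.Set.len, PySem.Set.inter, pvWords, List.countP_eq_length_filter]

-- A's strict-improvement scan and B's first-argmax fold run in lockstep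
theorem pv_lockstep (c : Int → String) (s g : Int → Int) (l : List Int)
    (hg : ∀ i ∈ l, g i = s i) :
    ∀ (b : Option String) (m bi : Int), m = s bi → g bi = m →
      ((b = some (c bi) ∧ 0 < m) ∨ (b = none ∧ m = 0)) →
      ∃ bi',
        l.foldl (fun acc i => match acc with
            | none => some i
            | some mI => if g mI < g i then some i else some mI) (some bi) = some bi' ∧
        (l.foldl (fun st i => if s i > st.2 then (some (c i), s i) else st) (b, m)).2 = s bi' ∧
        g bi' = s bi' ∧
        ((l.foldl (fun st i => if s i > st.2 then (some (c i), s i) else st) (b, m)).1 = none →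
          b = none ∧ bi' = bi) ∧
        (((l.foldl (fun st i => if s i > st.2 then (some (c i), s i) else st) (b, m)).1
            = some (c bi') ∧
          0 < (l.foldl (fun st i => if s i > st.2 then (some (c i), s i) else st) (b, m)).2) ∨
         ((l.foldl (fun st i => if s i > st.2 then (some (c i), s i) else st) (b, m)).1 = none ∧
          (l.foldl (fun st i => if s i > st.2 then (some (c i), s i) else st) (b, m)).2 = 0)) := by
  induction l with
  | nil =>
    intro b m bi hm hgbi hinv
    refine ⟨bi, rfl, by simpa using hm, by simp [hgbi, hm], by simp, ?_⟩
    simpa using hinv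
  | cons i l ih =>
    intro b m bi hm hgbi hinv
    have hgi : g i = s i := hg i (List.mem_cons_self)
    have hg' : ∀ j ∈ l, g j = s j := fun j hj => hg j (List.mem_cons_of_mem _ hj)
    have hm0 : 0 ≤ m := by rcases hinv with ⟨_, h⟩ | ⟨_, h⟩ <;> omega
    have ih' := fun b' m' bi' h1 h2 h3 => ih hg' b' m' bi' h1 h2 h3
    simp only [List.foldl_cons]
    by_cases himp : s i > m
    · have hcond : g bi < g i := by rw [hgbi, hgi]; exact himp
      have hA : (if s i > (b, m).2 then (some (c i), s i) else (b, m)) = (some (c i), s i) := by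
        simp [himp]
      rw [hA, if_pos hcond]
      obtain ⟨bi', e1, e2, e3, e4, e5⟩ :=
        ih' (some (c i)) (s i) i rfl hgi (Or.inl ⟨rfl, by omega⟩)
      refine ⟨bi', e1, e2, e3, ?_, ?_⟩
      · intro hnone
        exact absurd (e4 hnone).1 (by simp)
      · rcases e5 with h | h
        · exact Or.inl h
        · exact absurd (e4 h.1).1 (by simp)
    · have hcond : ¬ g bi < g i := by rw [hgbi, hgi]; exact himp
      have hA : (if s i > (b, m).2 then (some (c i), s i) else (b, m)) = (b, m) := by
        simp [himp]
      rw [hA, if_neg hcond]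
      exact ih' b m bi hm hgbi hinv

-- proof-side names for the quantities both ports compute
def pvScoreOf (query : String) (x : String) : Int :=
  PySem.Set.len (PySem.Set.inter (pvWords query) (pvWords x))

def pvC (chunks : List String) (j : Int) : String := PySem.List.pyGetD chunks j ""

def pvS (query : String) (chunks : List String) (j : Int) : Int :=
  pvScoreOf query (pvC chunks j)

def pvG (query : String) (chunks : List String) (i : Int) : Int :=
  ((PySem.Set.ofList (PySem.Str.split₀ (PySem.Str.lower query))).foldl (fun d w =>
      (((PySem.List.enumerate chunks).foldl (fun d p =>
          (PySem.Set.ofList (PySem.Str.split₀ (PySem.Str.lower p.2))).foldl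
            (fun d w => d.modify w [] (· ++ [p.1])) d) PySem.Dict.empty).getD w []).foldl
        (fun d i => d.modify i 0 (· + 1)) d) PySem.Dict.empty).getD i 0

-- Python's max(xs, key=…) is a first-argmax fold
theorem pv_max?_eq_fold (l : List Int) (g : Int → Int) :
    PySem.List.max? l g = l.foldl (fun acc x => match acc with
      | none => some x
      | some m => if g m < g x then some x else some m) none := by
  unfold PySem.List.max?
  congr 1
  funext acc x
  cases acc <;> rfl

-- the abstract shape of the whole equivalence, over an index range
theorem pv_select (c : Int → String) (s g : Int → Int) (n : Int) (hn : 0 < n)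
    (hg : ∀ i, 0 ≤ i → i < n → g i = s i)
    (hs0 : 0 ≤ s 0)
    (hempty : ∀ i, c i = "" → s i = 0) :
    (match ((PySem.List.pyRange 0 n).foldl
        (fun st i => if s i > st.2 then (some (c i), s i) else st)
        ((none : Option String), (0 : Int))).1 with
     | some bc => if bc = "" then c 0 else bc
     | none => c 0)
    = c ((PySem.List.max? (PySem.List.pyRange 0 n) g).getD 0) := by
  rw [pv_max?_eq_fold]
  have hg' : ∀ i ∈ PySem.List.pyRange 1 n, g i = s i := by
    intro i hi
    have := PySem.List.mem_pyRange_one.mp hi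
    exact hg i (by omega) (by omega)
  have hg0 : g 0 = s 0 := hg 0 le_rfl hn
  rw [PySem.List.pyRange_one_cons hn]
  simp only [List.foldl_cons, zero_add]
  by_cases h0 : s 0 > 0
  · have hA : (if s 0 > ((none : Option String), (0:Int)).2 then (some (c 0), s 0)
        else ((none : Option String), (0:Int))) = (some (c 0), s 0) := by simp [h0]
    rw [hA]
    obtain ⟨bi', e1, e2, e3, e4, e5⟩ :=
      pv_lockstep c s g _ hg' (some (c 0)) (s 0) 0 rfl hg0 (Or.inl ⟨rfl, h0⟩)
    rw [e1]
    rcases e5 with ⟨hsome, hpos⟩ | ⟨hnone, _⟩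
    · rw [hsome]
      have hne : c bi' ≠ "" := by
        intro he
        have := hempty bi' he
        omega
      simp [hne]
    · exact absurd (e4 hnone).1 (by simp)
  · have hs00 : s 0 = 0 := by omega
    have hA : (if s 0 > ((none : Option String), (0:Int)).2 then (some (c 0), s 0)
        else ((none : Option String), (0:Int))) = ((none : Option String), (0:Int)) := by
      simp [h0]
    rw [hA]
    obtain ⟨bi', e1, e2, e3, e4, e5⟩ :=
      pv_lockstep c s g _ hg' none 0 0 hs00.symm (by omega) (Or.inr ⟨rfl, rfl⟩)
    rw [e1]
    rcases e5 with ⟨hsome, hpos⟩ | ⟨hnone, _⟩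
    · rw [hsome]
      have hne : c bi' ≠ "" := by
        intro he
        have := hempty bi' he
        omega
      simp [hne]
    · rw [hnone]
      have : bi' = 0 := (e4 hnone).2
      simp [this]

-- ===== VERDICT (by name: the statement is the Claim_ definition above) =====
theorem select_top_chunk_spec : Claim_equal_select_top_chunk := by
  intro query chunks _ hpre
  have hlen : 0 < chunks.length := List.length_pos_of_ne_nil hpre
  have hlenI : (0 : Int) < (chunks.length : Int) := by exact_mod_cast hlen
  -- both ports, written with the small named quantities (definitional unfoldings)
  have hA1 : select_top_chunk query chunks
      = (match (chunks.foldl (fun st chunk =>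
            if pvScoreOf query chunk > st.2 then (some chunk, pvScoreOf query chunk) else st)
            ((none : Option String), (0 : Int))).1 with
         | some bc => if bc = "" then pvC chunks 0 else bc
         | none => pvC chunks 0) := rfl
  have hB1 : select_top_chunk_alt query chunks
      = pvC chunks ((PySem.List.max? (PySem.List.pyRange 0 (chunks.length : Int))
          (pvG query chunks)).getD 0) := rfl
  have hfold : chunks.foldl (fun st chunk =>
        if pvScoreOf query chunk > st.2 then (some chunk, pvScoreOf query chunk) else st)
        ((none : Option String), (0 : Int))
      = (PySem.List.pyRange 0 (chunks.length : Int)).foldl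
        (fun st j => if pvS query chunks j > st.2
          then (some (pvC chunks j), pvS query chunks j) else st)
        ((none : Option String), (0 : Int)) := by
    have h1 : (PySem.List.pyRange 0 (chunks.length : Int)).map (fun j => pvC chunks j)
        = chunks := by
      have := PySem.List.map_pyGetD_pyRange_zero chunks ""
      rw [PySem.List.len_eq] at this
      exact this
    conv_lhs => rw [← h1]
    rw [List.foldl_map]
    rfl
  unfold Spec_select_top_chunk
  rw [hA1, hB1, hfold]
  exact pv_select (pvC chunks) (pvS query chunks) (pvG query chunks)
    (chunks.length : Int) hlenI
    (fun i h0 hlt => by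
      show pvG query chunks i = pvS query chunks i
      unfold pvG pvS pvScoreOf pvC
      exact pv_counts_eq_score query chunks i h0 hlt)
    (Int.natCast_nonneg _)
    (fun i he => by
      show pvS query chunks i = 0
      unfold pvS pvScoreOf
      rw [he]
      have hw : pvWords "" = [] := by decide
      simp [hw, PySem.Set.inter, PySem.Set.len])
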